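-- pv_equiv track=rewrite | github.com/Nuppiz/Ristinolla | Board.py | check_columns_open
-- ===== SOURCE A (Python) =====
-- def check_columns_open(board, character, win_score):
--     final_score = 0
--
--     for column in range(0,len(board[0])):
--         score = 0
--         max_score = 0
--         open_len = 0
--
--         for row in range(0,len(board)):
--             if board[row][column] == character:
--                 score +=1
--                 open_len +=1
--                 if score > max_score:
--                     max_score = score
--             elif board[row][column] == "-":
--                 score = 0
--                 open_len +=1
--             else:
--                 score = 0
--                 open_len = 0
--                 max_score = 0
--
--             if open_len >= win_score and score > max_score:
--                 max_score = score
--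
--             if open_len >= win_score and max_score > final_score:
--                 final_score = max_score
--
--     return final_score
-- ===== SOURCE B (Python) =====
-- def check_columns_open(board, character, win_score):
--     # Segment decomposition: per column, split into maximal open segments
--     # (cells that are `character` or "-"); a qualifying segment (length >=
--     # win_score) contributes its longest run of `character` cells.
--     def longest_run(seg):
--         best = run = 0
--         for cell in seg:
--             run = run + 1 if cell == character else 0
--             if run > best:
--                 best = run
--         return best
--
--     final = 0
--     for c in range(len(board[0])):
--         seg = []
--         for row in board:
--             cell = row[c]
--             if cell == character or cell == "-":
--                 seg.append(cell)
--             else: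
--                 if len(seg) >= win_score:
--                     final = max(final, longest_run(seg))
--                 seg = []
--         if len(seg) >= win_score:
--             final = max(final, longest_run(seg))
--     return final
-- ===== Notes on version B (the rewrite author's own statement) =====
-- stated objective: alternative
-- what changed: Replaces A's four-variable running-state scan (score/max_score/open_len/final updated on every row) with a segment decomposition: each column is split into maximal open segments at opponent cells, and each segment of length >= win_score contributes its longest run of `character` via a small inner counter; Pre_ excludes only inputs where A raises IndexError (empty board, or a row shorter than row 0).
import Mathlib
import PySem

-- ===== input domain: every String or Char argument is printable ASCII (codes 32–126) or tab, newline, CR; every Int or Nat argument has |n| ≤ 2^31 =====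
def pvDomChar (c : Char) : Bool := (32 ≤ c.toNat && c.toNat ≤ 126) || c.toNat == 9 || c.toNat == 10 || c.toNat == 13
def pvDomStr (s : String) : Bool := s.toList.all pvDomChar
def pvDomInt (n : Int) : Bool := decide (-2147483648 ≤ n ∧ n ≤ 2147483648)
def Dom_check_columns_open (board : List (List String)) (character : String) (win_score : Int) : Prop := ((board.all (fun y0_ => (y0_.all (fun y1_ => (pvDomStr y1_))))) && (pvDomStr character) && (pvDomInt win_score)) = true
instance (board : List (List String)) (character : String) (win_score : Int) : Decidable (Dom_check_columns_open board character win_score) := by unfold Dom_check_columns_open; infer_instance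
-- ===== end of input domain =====

-- B replaces A's four-variable per-row state machine by a per-column segment
-- decomposition (split at opponent cells, score qualifying segments); objective: alternative.

-- ===== PORT A =====
-- loop body of A's inner `for row` loop; state s = (score, max_score, open_len, final_score)
def aStep (character : String) (win_score : Int) (column : Nat)
    (s : Int × Int × Int × Int) (row : List String) : Int × Int × Int × Int :=
  let cell := row.getD column ""   -- board[row][column]; Pre_ guarantees the index is in range
  let sml :=
    if cell = character then
      let score := s.1 + 1
      let open_len := s.2.2.1 + 1
      let max_score := if score > s.2.1 then score else s.2.1
      (score, max_score, open_len)
    else if cell = "-" then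
      ((0 : Int), s.2.1, s.2.2.1 + 1)
    else
      ((0 : Int), (0 : Int), (0 : Int))
  let max_score := if sml.2.2 ≥ win_score ∧ sml.1 > sml.2.1 then sml.1 else sml.2.1
  let final := if sml.2.2 ≥ win_score ∧ max_score > s.2.2.2 then max_score else s.2.2.2
  (sml.1, max_score, sml.2.2, final)

-- board[0] is ported as board.headD []; Pre_ excludes the empty board on which Python raises
def check_columns_open (board : List (List String)) (character : String) (win_score : Int) : Int :=
  (List.range (board.headD []).length).foldl
    (fun final_score column =>
      (board.foldl (aStep character win_score column) (0, 0, 0, final_score)).2.2.2)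
    0

-- ===== PORT B =====
-- longest_run's accumulator pair (best, run); pvLongestRun is Source B's longest_run
def pvRunAcc (character : String) (seg : List String) : Int × Int :=
  seg.foldl
    (fun (p : Int × Int) cell =>
      let run := if cell = character then p.2 + 1 else 0
      (if run > p.1 then run else p.1, run))
    (0, 0)

def pvLongestRun (character : String) (seg : List String) : Int :=
  (pvRunAcc character seg).1

-- Source B's `if len(seg) >= win_score: final = max(final, longest_run(seg))`
def pvFlush (character : String) (win_score : Int) (final : Int) (seg : List String) : Int :=
  if (seg.length : Int) ≥ win_score then max final (pvLongestRun character seg) else final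

-- loop body of B's inner `for row` loop; state s = (final, seg)
def bStep (character : String) (win_score : Int) (column : Nat)
    (s : Int × List String) (row : List String) : Int × List String :=
  let cell := row.getD column ""   -- row[c]; Pre_ guarantees the index is in range
  if cell = character ∨ cell = "-" then (s.1, s.2 ++ [cell])
  else (pvFlush character win_score s.1 s.2, [])

def check_columns_open_alt (board : List (List String)) (character : String) (win_score : Int) : Int :=
  (List.range (board.headD []).length).foldl
    (fun final c =>
      let st := board.foldl (bStep character win_score c) (final, [])
      pvFlush character win_score st.1 st.2)
    0

-- ===== PRECONDITION & SPEC =====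
-- Pre_ excludes exactly the inputs where Python A raises IndexError: the empty board
-- (board[0]) and boards with a row shorter than row 0 (board[row][column]).
def Pre_check_columns_open (board : List (List String)) (character : String) (win_score : Int) : Prop :=
  board ≠ [] ∧ ∀ row ∈ board, (board.headD []).length ≤ row.length
instance (board : List (List String)) (character : String) (win_score : Int) : Decidable (Pre_check_columns_open board character win_score) := by unfold Pre_check_columns_open; infer_instance

def pvWitness_check_columns_open : List (List String) × String × Int := ([["X"], ["-"]], "X", 2)

def Spec_check_columns_open (board : List (List String)) (character : String) (win_score : Int) (out : Int) : Prop := out = check_columns_open_alt board character win_score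
instance (board : List (List String)) (character : String) (win_score : Int) (out : Int) : Decidable (Spec_check_columns_open board character win_score out) := by unfold Spec_check_columns_open; infer_instance

-- ===== CLAIM (what is proved, stated in full; the proofs are below) =====
def Claim_equal_check_columns_open : Prop := ∀ (board : List (List String)) (character : String) (win_score : Int), Dom_check_columns_open board character win_score → Pre_check_columns_open board character win_score → Spec_check_columns_open board character win_score (check_columns_open board character win_score)

-- ===== LEMMAS AND PROOFS =====

theorem pvRunAcc_bounds (character : String) (seg : List String) :
    0 ≤ (pvRunAcc character seg).2 ∧ (pvRunAcc character seg).2 ≤ (pvRunAcc character seg).1 := by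
  suffices h : ∀ (p : Int × Int), 0 ≤ p.2 → p.2 ≤ p.1 →
      0 ≤ (seg.foldl (fun (p : Int × Int) cell =>
        let run := if cell = character then p.2 + 1 else 0
        (if run > p.1 then run else p.1, run)) p).2 ∧
      (seg.foldl (fun (p : Int × Int) cell =>
        let run := if cell = character then p.2 + 1 else 0
        (if run > p.1 then run else p.1, run)) p).2 ≤
      (seg.foldl (fun (p : Int × Int) cell =>
        let run := if cell = character then p.2 + 1 else 0
        (if run > p.1 then run else p.1, run)) p).1 by
    exact h (0, 0) le_rfl le_rfl
  induction seg with
  | nil => intro p h1 h2; exact ⟨h1, h2⟩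
  | cons cell rest ih =>
    intro p h1 h2
    simp only [List.foldl_cons]
    apply ih <;> dsimp only <;> split_ifs <;> omega

theorem pvRunAcc_append_char (character : String) (seg : List String) :
    pvRunAcc character (seg ++ [character]) =
      (if (pvRunAcc character seg).2 + 1 > (pvRunAcc character seg).1
         then (pvRunAcc character seg).2 + 1 else (pvRunAcc character seg).1,
       (pvRunAcc character seg).2 + 1) := by
  simp [pvRunAcc, List.foldl_append]

theorem pvRunAcc_append_nonchar (character : String) (seg : List String) (cell : String)
    (h : ¬ cell = character) :
    pvRunAcc character (seg ++ [cell]) = ((pvRunAcc character seg).1, 0) := by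
  have hb := pvRunAcc_bounds character seg
  simp only [pvRunAcc, List.foldl_append, List.foldl_cons, List.foldl_nil, if_neg h] at *
  split_ifs <;> simp_all <;> omega

theorem pvFlush_nonneg (character : String) (ws fB : Int) (seg : List String)
    (hf : 0 ≤ fB) : 0 ≤ pvFlush character ws fB seg := by
  unfold pvFlush
  split_ifs with h1
  · exact le_trans hf (le_max_left _ _)
  · exact hf

theorem pvFlush_nil (character : String) (ws fB : Int) (hf : 0 ≤ fB) :
    pvFlush character ws fB [] = fB := by
  unfold pvFlush pvLongestRun pvRunAcc
  simp only [List.foldl_nil, List.length_nil]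
  split_ifs
  · simp only [max_def]; split_ifs <;> omega
  · rfl

theorem step_inv (character : String) (ws : Int) (c : Nat) (row : List String)
    (seg : List String) (fB : Int) (hf : 0 ≤ fB) :
    aStep character ws c
      ((pvRunAcc character seg).2, (pvRunAcc character seg).1, (seg.length : Int),
        pvFlush character ws fB seg) row
    = ((pvRunAcc character (bStep character ws c (fB, seg) row).2).2,
       (pvRunAcc character (bStep character ws c (fB, seg) row).2).1,
       ((bStep character ws c (fB, seg) row).2.length : Int),
       pvFlush character ws (bStep character ws c (fB, seg) row).1
         (bStep character ws c (fB, seg) row).2) := by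
  obtain ⟨h1, h2⟩ := pvRunAcc_bounds character seg
  have hfl := pvFlush_nonneg character ws fB seg hf
  simp only [aStep, bStep, List.getD_eq_getElem?_getD]
  generalize (row[c]?.getD "" : String) = cell
  by_cases hc : cell = character
  · subst hc
    simp only [if_pos, true_or, pvRunAcc_append_char, pvFlush, pvLongestRun,
      List.length_append, List.length_cons, List.length_nil, Prod.mk.injEq]
    push_cast
    refine ⟨?_, ?_, ⟨rfl, ?_⟩⟩ <;> (try simp only [max_def]) <;> (try split_ifs) <;> omega
  · by_cases hd : cell = "-"
    · subst hd
      simp only [if_neg hc, or_true, if_pos, pvRunAcc_append_nonchar character seg _ hc,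
        pvFlush, pvLongestRun, List.length_append, List.length_cons, List.length_nil, Prod.mk.injEq]
      push_cast
      refine ⟨?_, ?_, ⟨rfl, ?_⟩⟩ <;> (try simp only [max_def]) <;> (try split_ifs) <;> omega
    · have hor : ¬ (cell = character ∨ cell = "-") := by tauto
      simp only [if_neg hc, if_neg hd, if_neg hor, pvFlush, pvLongestRun, pvRunAcc,
        List.foldl_nil, List.length_nil, Prod.mk.injEq]
      refine ⟨?_, ?_, ⟨rfl, ?_⟩⟩ <;> (try simp only [max_def]) <;> (try split_ifs) <;> omega

theorem inner_eq (character : String) (ws : Int) (c : Nat) (rows : List (List String)) :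
    ∀ (seg : List String) (fB : Int), 0 ≤ fB →
      (rows.foldl (aStep character ws c)
        ((pvRunAcc character seg).2, (pvRunAcc character seg).1, (seg.length : Int),
          pvFlush character ws fB seg)).2.2.2
      = pvFlush character ws (rows.foldl (bStep character ws c) (fB, seg)).1
          (rows.foldl (bStep character ws c) (fB, seg)).2 := by
  induction rows with
  | nil => intro seg fB hf; simp [List.foldl_nil]
  | cons row rest ih =>
    intro seg fB hf
    simp only [List.foldl_cons]
    rw [step_inv character ws c row seg fB hf]
    by_cases hc : row.getD c "" = character ∨ row.getD c "" = "-"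
    · have hb : bStep character ws c (fB, seg) row = (fB, seg ++ [row.getD c ""]) := by
        simp only [bStep]; rw [if_pos hc]
      rw [hb]
      exact ih (seg ++ [row.getD c ""]) fB hf
    · have hb : bStep character ws c (fB, seg) row = (pvFlush character ws fB seg, []) := by
        simp only [bStep]; rw [if_neg hc]
      rw [hb]
      exact ih [] _ (pvFlush_nonneg character ws fB seg hf)

theorem bfold_nonneg (character : String) (ws : Int) (c : Nat) (rows : List (List String)) :
    ∀ (seg : List String) (fB : Int), 0 ≤ fB →
      0 ≤ (rows.foldl (bStep character ws c) (fB, seg)).1 := by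
  induction rows with
  | nil => intro seg fB hf; exact hf
  | cons row rest ih =>
    intro seg fB hf
    simp only [List.foldl_cons, bStep]
    split_ifs with h
    · exact ih _ fB hf
    · exact ih _ _ (pvFlush_nonneg character ws fB seg hf)

theorem col_eq (board : List (List String)) (character : String) (ws : Int) (c : Nat)
    (f : Int) (hf : 0 ≤ f) :
    (board.foldl (aStep character ws c) (0, 0, 0, f)).2.2.2
    = pvFlush character ws (board.foldl (bStep character ws c) (f, [])).1
        (board.foldl (bStep character ws c) (f, [])).2 := by
  have h := inner_eq character ws c board [] f hf
  rw [pvFlush_nil character ws f hf] at h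
  simpa [pvRunAcc] using h

theorem outer_eq (board : List (List String)) (character : String) (ws : Int)
    (cols : List Nat) :
    ∀ (f : Int), 0 ≤ f →
      cols.foldl (fun final_score column =>
          (board.foldl (aStep character ws column) (0, 0, 0, final_score)).2.2.2) f
      = cols.foldl (fun final c =>
          let st := board.foldl (bStep character ws c) (final, [])
          pvFlush character ws st.1 st.2) f := by
  induction cols with
  | nil => intro f hf; rfl
  | cons c rest ih =>
    intro f hf
    simp only [List.foldl_cons]
    rw [col_eq board character ws c f hf]
    exact ih _ (pvFlush_nonneg character ws _ _ (bfold_nonneg character ws c board [] f hf))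


-- ===== VERDICT (by name: the statement is the Claim_ definition above) =====
theorem check_columns_open_spec : Claim_equal_check_columns_open := by
  intro board character win_score _ _
  unfold Spec_check_columns_open check_columns_open check_columns_open_alt
  exact outer_eq board character win_score (List.range (board.headD []).length) 0 le_rfl
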